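-- pv_equiv track=rewrite | github.com/Diego-Roque/Algoritmos | codeforces/vitaliy_and_pie.py | min_keys_needed
-- ===== SOURCE A (Python) =====
-- def min_keys_needed(n, s):
--
--     keys = s[::2]
--     doors = s[1::2]
--
--
--     available_keys = set()
--     missing_keys = 0
--
--
--     for i in range(n - 1):
--
--         available_keys.add(keys[i])
--
--
--         current_door = doors[i]
--
--
--         matching_key = current_door.lower()
--         if matching_key not in available_keys:
--
--             missing_keys += 1
--             available_keys.add(matching_key)
--
--     return missing_keys
-- ===== SOURCE B (Python) =====
-- def min_keys_needed(n, s):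
--     keys = s[::2]
--     doors = s[1::2]
--     m = n - 1
--     # Phase 1: one pass recording the first index of each key value and of
--     # each (lowered) door value among positions 0..m-1.
--     first_key = {}
--     first_door = {}
--     for i in range(m):
--         k = keys[i]
--         if k not in first_key:
--             first_key[k] = i
--         d = doors[i].lower()
--         if d not in first_door:
--             first_door[d] = i
--     # Phase 2: a door letter must be bought iff its first need comes strictly
--     # before its first key (a key that never appears counts as index m).
--     missing = 0
--     for d, i in first_door.items():
--         if first_key.get(d, m) > i:
--             missing += 1
--     return missing
-- ===== Notes on version B (the rewrite author's own statement) =====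
-- stated objective: alternative
-- what changed: Replaces the interleaved set-buying simulation with a two-phase decomposition: one pass builds first-occurrence index tables for key values and lowered door values, then the count is the number of distinct door letters whose first need precedes their first key.
import Mathlib
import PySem

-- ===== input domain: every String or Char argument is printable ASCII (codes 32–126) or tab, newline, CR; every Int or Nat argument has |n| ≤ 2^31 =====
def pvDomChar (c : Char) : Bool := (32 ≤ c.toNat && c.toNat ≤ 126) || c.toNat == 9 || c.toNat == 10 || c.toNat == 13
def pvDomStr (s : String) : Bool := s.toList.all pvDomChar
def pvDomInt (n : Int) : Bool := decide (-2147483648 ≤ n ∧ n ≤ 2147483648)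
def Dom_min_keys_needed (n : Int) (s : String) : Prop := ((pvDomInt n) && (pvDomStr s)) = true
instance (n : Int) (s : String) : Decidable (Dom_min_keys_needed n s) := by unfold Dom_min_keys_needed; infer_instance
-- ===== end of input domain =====

-- B replaces A's interleaved set-buying simulation by a two-phase index-table
-- decomposition (build first-occurrence tables, then compare first-door vs
-- first-key indices); same O(n) cost, alternative algorithm.

-- ===== PORT A =====
-- Under Pre_ every loop index is in range, so pyGetD's default ' ' is never
-- returned (out-of-range indices are exactly A's IndexError inputs, excluded by Pre_).
def min_keys_needed (n : Int) (s : String) : Int :=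
  let keys : List Char := (PySem.List.slice? s.toList none none 2).getD []
  let doors : List Char := (PySem.List.slice? s.toList (some 1) none 2).getD []
  let final :=
    (PySem.List.pyRange 0 (n - 1) 1).foldl
      (fun (st : PySem.Set Char × Int) i =>
        let available := PySem.Set.add st.1 (PySem.List.pyGetD keys i ' ')
        let matching := PySem.Chars.lowerChar (PySem.List.pyGetD doors i ' ')
        if PySem.Set.contains available matching then (available, st.2)
        else (PySem.Set.add available matching, st.2 + 1))
      (PySem.Set.empty, 0)
  final.2

-- ===== PORT B =====
def min_keys_needed_alt (n : Int) (s : String) : Int :=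
  let keys : List Char := (PySem.List.slice? s.toList none none 2).getD []
  let doors : List Char := (PySem.List.slice? s.toList (some 1) none 2).getD []
  let m := n - 1
  let tables :=
    (PySem.List.pyRange 0 m 1).foldl
      (fun (p : PySem.Dict Char Int × PySem.Dict Char Int) i =>
        let k := PySem.List.pyGetD keys i ' '
        let fk := if p.1.contains k then p.1 else p.1.insert k i
        let d := PySem.Chars.lowerChar (PySem.List.pyGetD doors i ' ')
        let fd := if p.2.contains d then p.2 else p.2.insert d i
        (fk, fd))
      (PySem.Dict.empty, PySem.Dict.empty)
  tables.2.items.foldl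
    (fun missing q => if tables.1.getD q.1 m > q.2 then missing + 1 else missing) 0

-- ===== PRECONDITION & SPEC =====
-- Pre_ excludes exactly the inputs where A raises IndexError: the loop wants
-- n-1 key/door pairs but only len(s)//2 exist.
def Pre_min_keys_needed (n : Int) (s : String) : Prop :=
  n - 1 ≤ ((s.toList.length / 2 : Nat) : Int)
instance (n : Int) (s : String) : Decidable (Pre_min_keys_needed n s) := by
  unfold Pre_min_keys_needed; infer_instance
def pvWitness_min_keys_needed : Int × String := (3, "aAbBcd")

def Spec_min_keys_needed (n : Int) (s : String) (out : Int) : Prop := out = min_keys_needed_alt n s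
instance (n : Int) (s : String) (out : Int) : Decidable (Spec_min_keys_needed n s out) := by unfold Spec_min_keys_needed; infer_instance

-- ===== CLAIM (what is proved, stated in full; the proofs are below) =====
def Claim_equal_min_keys_needed : Prop := ∀ (n : Int) (s : String), Dom_min_keys_needed n s → Pre_min_keys_needed n s → Spec_min_keys_needed n s (min_keys_needed n s)

-- ===== LEMMAS AND PROOFS =====

-- s[::2] / s[1::2] as structural recursion: elements at even / odd positions.
def pvEvens {α : Type} : List α → List α
  | [] => []
  | [a] => [a]
  | a :: _ :: l => a :: pvEvens l

lemma pvEvens_eq_filterMap {α : Type} (l : List α) :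
    (List.range ((l.length + 1) / 2)).filterMap (fun k => l[2 * k]?) = pvEvens l := by
  induction l using pvEvens.induct with
  | case1 => simp [pvEvens]
  | case2 a => simp [pvEvens, List.range_succ]
  | case3 a b l ih =>
    have hlen : ((a :: b :: l).length + 1) / 2 = (l.length + 1) / 2 + 1 := by
      simp; omega
    rw [hlen, List.range_succ_eq_map, List.filterMap_cons, List.filterMap_map]
    simp only [Function.comp]
    have hidx : ∀ k : Nat, (a :: b :: l)[2 * (k + 1)]? = l[2 * k]? := by
      intro k
      have h2 : 2 * (k + 1) = 2 * k + 1 + 1 := by omega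
      simp [h2]
    simp only [Nat.succ_eq_add_one, hidx]
    simp [pvEvens, ih]

lemma pvEvens_length {α : Type} (l : List α) :
    (pvEvens l).length = (l.length + 1) / 2 := by
  induction l using pvEvens.induct with
  | case1 => simp [pvEvens]
  | case2 a => simp [pvEvens]
  | case3 a b l ih => simp [pvEvens, ih]; omega

lemma pvSlice2_none (α : Type) (xs : List α) :
    PySem.List.slice? xs none none 2 = some (pvEvens xs) := by
  rw [← pvEvens_eq_filterMap]
  simp only [PySem.List.slice?, PySem.List.sliceIndices]
  norm_num
  have h1 : (if 0 < xs.length then (((xs.length : Int) + 2 - 1) / 2).toNat else 0)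
      = (xs.length + 1) / 2 := by
    split_ifs with h <;> omega
  rw [h1]
  apply List.filterMap_congr
  intro k _
  have h2 : (2 * (k : Int)).toNat = 2 * k := by omega
  rw [h2]

lemma pvSlice2_one (α : Type) (xs : List α) :
    PySem.List.slice? xs (some 1) none 2 = some (pvEvens xs.tail) := by
  cases xs with
  | nil => simp [PySem.List.slice?, PySem.List.sliceIndices, pvEvens]
  | cons a t =>
    rw [← pvEvens_eq_filterMap]
    simp only [PySem.List.slice?, PySem.List.sliceIndices]
    norm_num
    have h1 : (if 0 < t.length then (((t.length : Int) + 2 - 1) / 2).toNat else 0)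
        = (t.length + 1) / 2 := by
      split_ifs with h <;> omega
    rw [h1]
    apply List.filterMap_congr
    intro k _
    have h2 : (1 + 2 * (k : Int)).toNat = 2 * k + 1 := by omega
    rw [h2, List.getElem?_cons_succ]

-- the two ports' keys / doors lists, named for the proofs
def pvK (s : String) : List Char := (PySem.List.slice? s.toList none none 2).getD []
def pvD (s : String) : List Char := (PySem.List.slice? s.toList (some 1) none 2).getD []

lemma pvK_length (s : String) : (pvK s).length = (s.toList.length + 1) / 2 := by
  rw [pvK, pvSlice2_none]; simp [pvEvens_length]

lemma pvD_length (s : String) : (pvD s).length = s.toList.length / 2 := by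
  rw [pvD, pvSlice2_one]; simp [pvEvens_length]; omega

-- generic indexed traversal of the two parallel lists
def pvGo {σ : Type} (f : σ → Char → Char → Int → σ) : List Char → List Char → Int → σ → σ
  | k :: ks, d :: ds, i, st => pvGo f ks ds (i + 1) (f st k d i)
  | _, _, _, st => st

-- step functions of the two ports, as functions of the fetched characters
def pvFA (st : PySem.Set Char × Int) (k dr : Char) (_i : Int) : PySem.Set Char × Int :=
  let available := PySem.Set.add st.1 k
  let matching := PySem.Chars.lowerChar dr
  if PySem.Set.contains available matching then (available, st.2)
  else (PySem.Set.add available matching, st.2 + 1)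

def pvFB (p : PySem.Dict Char Int × PySem.Dict Char Int) (k dr : Char) (i : Int) :
    PySem.Dict Char Int × PySem.Dict Char Int :=
  let fk := if p.1.contains k then p.1 else p.1.insert k i
  let d := PySem.Chars.lowerChar dr
  let fd := if p.2.contains d then p.2 else p.2.insert d i
  (fk, fd)

-- B's phase-2 count
def pvCountB (p : PySem.Dict Char Int × PySem.Dict Char Int) (m : Int) : Int :=
  p.2.items.foldl (fun missing q => if p.1.getD q.1 m > q.2 then missing + 1 else missing) 0

lemma pvFold_aux {σ : Type} (f : σ → Char → Char → Int → σ) (xs ys : List Char) (m : Int)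
    (hx : m.toNat ≤ xs.length) (hy : m.toNat ≤ ys.length) :
    ∀ (c : Nat) (a : Int) (st : σ), 0 ≤ a → (m - a).toNat = c →
    (PySem.List.pyRange a m 1).foldl
      (fun st j => f st (PySem.List.pyGetD xs j ' ') (PySem.List.pyGetD ys j ' ') j) st
    = pvGo f ((xs.drop a.toNat).take c) ((ys.drop a.toNat).take c) a st := by
  intro c
  induction c with
  | zero =>
    intro a st ha hc
    rw [PySem.List.pyRange_one_eq_nil (by omega)]
    simp [pvGo]
  | succ c ih =>
    intro a st ha hc
    have ham : a < m := by omega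
    have hax : a.toNat < xs.length := by omega
    have hay : a.toNat < ys.length := by omega
    rw [PySem.List.pyRange_one_cons ham, List.foldl_cons]
    rw [List.drop_eq_getElem_cons hax, List.drop_eq_getElem_cons hay,
        List.take_succ_cons, List.take_succ_cons]
    have hgx : PySem.List.pyGetD xs a ' ' = xs[a.toNat] := by
      rw [PySem.List.pyGetD_of_nonneg xs ' ' ha, List.getD_eq_getElem _ _ hax]
    have hgy : PySem.List.pyGetD ys a ' ' = ys[a.toNat] := by
      rw [PySem.List.pyGetD_of_nonneg ys ' ' ha, List.getD_eq_getElem _ _ hay]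
    rw [show pvGo f (xs[a.toNat] :: (xs.drop (a.toNat + 1)).take c)
          (ys[a.toNat] :: (ys.drop (a.toNat + 1)).take c) a st
        = pvGo f ((xs.drop (a.toNat + 1)).take c) ((ys.drop (a.toNat + 1)).take c) (a + 1)
            (f st xs[a.toNat] ys[a.toNat] a) from rfl]
    rw [hgx, hgy]
    have hsucc : (a + 1).toNat = a.toNat + 1 := by omega
    rw [← hsucc]
    exact ih (a + 1) _ (by omega) (by omega)

lemma pvFold_range_eq_go {σ : Type} (f : σ → Char → Char → Int → σ)
    (xs ys : List Char) (m : Int) (st : σ)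
    (hx : m.toNat ≤ xs.length) (hy : m.toNat ≤ ys.length) :
    (PySem.List.pyRange 0 m 1).foldl
      (fun st j => f st (PySem.List.pyGetD xs j ' ') (PySem.List.pyGetD ys j ' ') j) st
    = pvGo f (xs.take m.toNat) (ys.take m.toNat) 0 st := by
  have h := pvFold_aux f xs ys m hx hy m.toNat 0 st le_rfl (by omega)
  simpa using h

lemma pvCountB_congr (fk fk' fd : PySem.Dict Char Int) (m : Int)
    (h : ∀ q ∈ fd.items, (fk'.getD q.1 m > q.2) = (fk.getD q.1 m > q.2)) :
    pvCountB (fk', fd) m = pvCountB (fk, fd) m := by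
  unfold pvCountB
  exact PySem.List.foldl_congr_mem _ _ _ _ (fun acc q hq => by simp only [h q hq])

lemma pvCountB_insert_fresh (fk fd : PySem.Dict Char Int) (d : Char) (i m : Int)
    (h : fd.contains d = false) :
    pvCountB (fk, fd.insert d i) m
    = pvCountB (fk, fd) m + (if fk.getD d m > i then 1 else 0) := by
  unfold pvCountB
  rw [PySem.Dict.items_insert_of_not_contains fd i h, List.foldl_append]
  simp only [List.foldl_cons, List.foldl_nil]
  split_ifs <;> omega

-- a key the dictionary contains has an item value below the running index bound
lemma pvGetD_lt (fk : PySem.Dict Char Int) (x : Char) (m i0 : Int)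
    (hc : fk.contains x = true) (hI : ∀ q ∈ fk.items, q.2 < i0) :
    fk.getD x m < i0 := by
  rw [PySem.Dict.contains_eq_isSome_get?] at hc
  obtain ⟨v, hv⟩ := Option.isSome_iff_exists.mp hc
  rw [PySem.Dict.getD_of_get?_eq_some _ _ hv]
  exact hI (x, v) (PySem.Dict.mem_items_of_get?_eq_some _ hv)

-- the coupled invariant induction: A's running count equals B's final
-- first-door-vs-first-key comparison count
lemma pvCouple (m : Int) :
    ∀ (ks ds : List Char) (i0 : Int) (S : PySem.Set Char) (c : Int)
      (fk fd : PySem.Dict Char Int),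
      ks.length = ds.length →
      i0 + ks.length ≤ m →
      (∀ x : Char, x ∈ S ↔ (fk.contains x = true ∨ fd.contains x = true)) →
      (∀ q ∈ fk.items, q.2 < i0) →
      (∀ q ∈ fd.items, q.2 < i0) →
      c = pvCountB (fk, fd) m →
      (pvGo pvFA ks ds i0 (S, c)).2 = pvCountB (pvGo pvFB ks ds i0 (fk, fd)) m := by
  intro ks
  induction ks with
  | nil =>
    intro ds i0 S c fk fd hlen hm hS hIk hId hc
    cases ds with
    | nil => exact hc
    | cons dr dt => simp at hlen
  | cons k kt ih =>
    intro ds i0 S c fk fd hlen hm hS hIk hId hc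
    cases ds with
    | nil => simp at hlen
    | cons dr dt =>
      have hlen' : kt.length = dt.length := by simpa using hlen
      have hi0m : i0 < m := by simp at hm; omega
      obtain ⟨d, hd⟩ : ∃ d, PySem.Chars.lowerChar dr = d := ⟨_, rfl⟩
      -- the two successor dictionaries
      have hBstep : pvFB (fk, fd) k dr i0
          = (if fk.contains k then fk else fk.insert k i0,
             if fd.contains d then fd else fd.insert d i0) := by
        simp only [pvFB, hd]
      obtain ⟨fk', hfk'⟩ : ∃ fk', (if fk.contains k then fk else fk.insert k i0) = fk' := ⟨_, rfl⟩
      obtain ⟨fd', hfd'⟩ : ∃ fd', (if fd.contains d then fd else fd.insert d i0) = fd' := ⟨_, rfl⟩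
      rw [hfk', hfd'] at hBstep
      -- successor facts
      have hfk'c : ∀ x, fk'.contains x = true ↔ (x = k ∨ fk.contains x = true) := by
        intro x; rw [← hfk']; split_ifs with h
        · constructor
          · exact .inr
          · rintro (rfl | hx); exacts [h, hx]
        · rw [PySem.Dict.contains_insert]; simp [beq_iff_eq]
      have hfd'c : ∀ x, fd'.contains x = true ↔ (x = d ∨ fd.contains x = true) := by
        intro x; rw [← hfd']; split_ifs with h
        · constructor
          · exact .inr
          · rintro (rfl | hx); exacts [h, hx]
        · rw [PySem.Dict.contains_insert]; simp [beq_iff_eq]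
      have hIk' : ∀ q ∈ fk'.items, q.2 < i0 + 1 := by
        intro q hq; rw [← hfk'] at hq; split_ifs at hq with h
        · exact lt_trans (hIk q hq) (by omega)
        · rw [PySem.Dict.items_insert_of_not_contains _ _ (by simpa using h)] at hq
          rcases List.mem_append.mp hq with h1 | h1
          · exact lt_trans (hIk q h1) (by omega)
          · simp at h1; rw [h1]; show i0 < i0 + 1; omega
      have hId' : ∀ q ∈ fd'.items, q.2 < i0 + 1 := by
        intro q hq; rw [← hfd'] at hq; split_ifs at hq with h
        · exact lt_trans (hId q hq) (by omega)
        · rw [PySem.Dict.items_insert_of_not_contains _ _ (by simpa using h)] at hq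
          rcases List.mem_append.mp hq with h1 | h1
          · exact lt_trans (hId q h1) (by omega)
          · simp at h1; rw [h1]; show i0 < i0 + 1; omega
      -- replacing fk by fk' does not change any comparison over fd's items
      have hcongr : pvCountB (fk', fd) m = pvCountB (fk, fd) m := by
        apply pvCountB_congr
        intro q hq
        rw [← hfk']; split_ifs with h
        · rfl
        · by_cases hqk : q.1 = k
          · rw [hqk]
            simp only [PySem.Dict.getD_insert, if_true]
            rw [PySem.Dict.getD_of_not_contains fk m (by simpa using h)]
            have := hId q hq
            rw [eq_iff_iff]; omega
          · simp only [PySem.Dict.getD_insert, if_neg hqk]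
      -- step the two programs
      rw [show pvGo pvFA (k :: kt) (dr :: dt) i0 (S, c)
            = pvGo pvFA kt dt (i0 + 1) (pvFA (S, c) k dr i0) from rfl,
          show pvGo pvFB (k :: kt) (dr :: dt) i0 (fk, fd)
            = pvGo pvFB kt dt (i0 + 1) (pvFB (fk, fd) k dr i0) from rfl,
          hBstep]
      have hAstep : pvFA (S, c) k dr i0
          = (if PySem.Set.contains (PySem.Set.add S k) d
             then (PySem.Set.add S k, c)
             else (PySem.Set.add (PySem.Set.add S k) d, c + 1)) := by
        simp only [pvFA, hd]
      by_cases hin : d ∈ PySem.Set.add S k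
      · -- the door can be opened: A keeps its count, B's tables give the same verdict
        have hin' : d = k ∨ fk.contains d = true ∨ fd.contains d = true := by
          rw [PySem.Set.mem_add, hS d] at hin; tauto
        rw [hAstep, if_pos ((PySem.Set.contains_iff _ _).mpr hin)]
        have hc' : c = pvCountB (fk', fd') m := by
          rw [← hfd']; split_ifs with h
          · rw [hcongr]; exact hc
          · have hfree : fd.contains d = false := by simpa using h
            have hle : fk'.getD d m < i0 + 1 := by
              apply pvGetD_lt fk' d m (i0 + 1) _ hIk'
              rw [hfk'c]
              rcases hin' with h1 | h1 | h1
              · exact .inl h1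
              · exact .inr h1
              · rw [h1] at hfree; simp at hfree
            rw [pvCountB_insert_fresh _ _ _ _ _ hfree, if_neg (by omega), hcongr]
            omega
        have hS' : ∀ x, x ∈ PySem.Set.add S k
            ↔ (fk'.contains x = true ∨ fd'.contains x = true) := by
          intro x
          rw [PySem.Set.mem_add, hS x, hfk'c x, hfd'c x]
          by_cases hx : x = d
          · subst hx
            constructor
            · intro; tauto
            · intro; rw [PySem.Set.mem_add, hS x] at hin; tauto
          · tauto
        exact ih dt (i0 + 1) _ c fk' fd' hlen' (by simp at hm ⊢; omega) hS' hIk' hId' hc'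
      · -- missing key: A buys it, B's tables count it
        have hnin : ¬ (d = k ∨ fk.contains d = true ∨ fd.contains d = true) := by
          rw [PySem.Set.mem_add, hS d] at hin; tauto
        simp only [not_or] at hnin
        obtain ⟨hdk, hdfk, hdfd⟩ := hnin
        have hdfk' : fk.contains d = false := by simpa using hdfk
        have hdfd' : fd.contains d = false := by simpa using hdfd
        rw [hAstep, if_neg (by rw [PySem.Set.contains_iff]; exact hin)]
        have hgd : fk'.getD d m = m := by
          rw [← hfk']; split_ifs with h
          · exact PySem.Dict.getD_of_not_contains fk m hdfk'
          · simp only [PySem.Dict.getD_insert, if_neg hdk]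
            exact PySem.Dict.getD_of_not_contains fk m hdfk'
        have hc' : c + 1 = pvCountB (fk', fd') m := by
          rw [← hfd', if_neg (by simp [hdfd'])]
          rw [pvCountB_insert_fresh _ _ _ _ _ hdfd', hgd, if_pos (by omega), hcongr]
          omega
        have hS' : ∀ x, x ∈ PySem.Set.add (PySem.Set.add S k) d
            ↔ (fk'.contains x = true ∨ fd'.contains x = true) := by
          intro x
          rw [PySem.Set.mem_add, PySem.Set.mem_add, hS x, hfk'c x, hfd'c x]
          tauto
        exact ih dt (i0 + 1) _ (c + 1) fk' fd' hlen' (by simp at hm ⊢; omega) hS' hIk' hId' hc'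

-- the two ports, written through pvGo (definitional transliteration bridges)
lemma pvA_eq (n : Int) (s : String) :
    min_keys_needed n s
    = (List.foldl
        (fun (st : PySem.Set Char × Int) j =>
          pvFA st (PySem.List.pyGetD (pvK s) j ' ') (PySem.List.pyGetD (pvD s) j ' ') j)
        (PySem.Set.empty, 0) (PySem.List.pyRange 0 (n - 1) 1)).2 := rfl

lemma pvB_eq (n : Int) (s : String) :
    min_keys_needed_alt n s
    = pvCountB
        (List.foldl
          (fun (p : PySem.Dict Char Int × PySem.Dict Char Int) j =>
            pvFB p (PySem.List.pyGetD (pvK s) j ' ') (PySem.List.pyGetD (pvD s) j ' ') j)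
          (PySem.Dict.empty, PySem.Dict.empty) (PySem.List.pyRange 0 (n - 1) 1)) (n - 1) := rfl

-- ===== VERDICT (by name: the statement is the Claim_ definition above) =====
theorem min_keys_needed_spec : Claim_equal_min_keys_needed := by
  intro n s _hdom hpre
  unfold Spec_min_keys_needed
  unfold Pre_min_keys_needed at hpre
  rw [pvA_eq, pvB_eq]
  by_cases hneg : n - 1 ≤ 0
  · rw [PySem.List.pyRange_one_eq_nil (by omega)]
    simp [pvCountB, PySem.Dict.empty]
  · have hx : (n - 1).toNat ≤ (pvK s).length := by rw [pvK_length]; omega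
    have hy : (n - 1).toNat ≤ (pvD s).length := by rw [pvD_length]; omega
    rw [pvFold_range_eq_go pvFA (pvK s) (pvD s) (n - 1) _ hx hy,
        pvFold_range_eq_go pvFB (pvK s) (pvD s) (n - 1) _ hx hy]
    apply pvCouple (n - 1) _ _ 0 PySem.Set.empty 0 PySem.Dict.empty PySem.Dict.empty
    · simp [List.length_take]; omega
    · simp [List.length_take]; omega
    · intro x; simp [PySem.Set.empty, PySem.Dict.contains_empty]
    · intro q hq; simp [PySem.Dict.empty] at hq
    · intro q hq; simp [PySem.Dict.empty] at hq
    · simp [pvCountB, PySem.Dict.empty]
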